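-- pv_equiv track=rewrite | github.com/t1ooo/geeksforgeeks | sum-of-bit-differences-among-all-pairs/main.py | countBitsV4
-- ===== SOURCE A (Python) =====
-- INT_LEN = 32
--
-- MOD = pow(10, 9)+7
--
-- def countBitsV4(N, A):
--     def intToBitArray(num):
--         bits = []
--         for i in range(0, INT_LEN):
--             if num & (1 << i):
--                 bits.append(1)
--             else:
--                 bits.append(0)
--         return bits
--
--     res = 0
--     bits = [intToBitArray(num) for num in A]
--     for i in range(INT_LEN):
--         count = sum(bit[i] for bit in bits)
--         res += (count * (N - count) * 2)
--
--     return res % MOD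
-- ===== SOURCE B (Python) =====
-- INT_LEN = 32
--
-- MOD = pow(10, 9)+7
--
-- MASK = (1 << INT_LEN) - 1
--
-- def _popcount(x):
--     c = 0
--     while x:
--         c += x & 1
--         x >>= 1
--     return c
--
-- def countBitsV4(N, A):
--     total = 0
--     for a in A:
--         total += _popcount(a & MASK)
--     common = 0
--     for a in A:
--         for b in A:
--             common += _popcount(a & b & MASK)
--     return (2 * (N * total - common)) % MOD
-- ===== Notes on version B (the rewrite author's own statement) =====
-- stated objective: alternative
-- what changed: B abandons per-bit-position counting altogether: using the identity sum_i 2*c_i*(N-c_i) = 2*(N*sum_a popcount32(a) - sum_{a,b} popcount32(a&b)), it computes one popcount per element plus one popcount per ordered pair via a bit-stripping while loop, trading A's 32-column count for pairwise AND popcounts.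
import Mathlib
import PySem

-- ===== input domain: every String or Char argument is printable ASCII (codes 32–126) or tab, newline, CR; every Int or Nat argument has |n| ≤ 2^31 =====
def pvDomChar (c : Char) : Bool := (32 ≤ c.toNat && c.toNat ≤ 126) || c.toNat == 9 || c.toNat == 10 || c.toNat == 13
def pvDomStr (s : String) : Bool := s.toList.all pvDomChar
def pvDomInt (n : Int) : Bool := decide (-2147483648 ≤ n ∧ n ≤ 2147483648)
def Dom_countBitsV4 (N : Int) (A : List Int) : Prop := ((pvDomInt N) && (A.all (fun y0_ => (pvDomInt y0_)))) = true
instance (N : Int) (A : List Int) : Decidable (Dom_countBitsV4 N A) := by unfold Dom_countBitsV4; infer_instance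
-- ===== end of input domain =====

-- B replaces A's per-bit-position counting (32-column bit matrix) by the identity
-- sum_i 2*c_i*(N-c_i) = 2*(N*sum_a popcount32(a) - sum_{a,b} popcount32(a & b)):
-- one popcount per element plus one popcount per ordered pair (objective: alternative algorithm).

-- ===== PORT A =====
-- `num & (1 << i)` is PySem.Int.band num (1 <<< i) (Python-exact on negatives);
-- `bit[i]` uses getD: i < 32 = length of every row, so always in range.
def intToBitArray (num : Int) : List Int :=
  (List.range 32).foldl
    (fun bits (i : Nat) => if PySem.Int.band num ((1:Int) <<< i) ≠ 0 then bits ++ [1] else bits ++ [0]) []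

def countBitsV4 (N : Int) (A : List Int) : Int :=
  let bits := A.map intToBitArray
  let res := (List.range 32).foldl
    (fun res i =>
      let count := (bits.map (fun bit => bit.getD i 0)).sum
      res + count * (N - count) * 2) 0
  PySem.Int.mod res (10 ^ 9 + 7)

-- ===== PORT B =====
-- _popcount's while loop, transcribed on the Nat value of its argument: every call site
-- passes a masked value x ≥ 0, where Python's `x & 1` is x.toNat % 2 and `x >>= 1` is x.toNat / 2.
def popcountAux (c : Int) (n : Nat) : Int :=
  if h : n = 0 then c else popcountAux (c + ((n % 2 : Nat) : Int)) (n / 2)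
termination_by n
decreasing_by exact Nat.div_lt_self (Nat.pos_of_ne_zero h) one_lt_two

def popcount (x : Int) : Int := popcountAux 0 x.toNat

def countBitsV4_alt (N : Int) (A : List Int) : Int :=
  let mask : Int := ((1:Int) <<< 32) - 1
  let total := A.foldl (fun t a => t + popcount (PySem.Int.band a mask)) 0
  let common := A.foldl (fun c a =>
    A.foldl (fun c b => c + popcount (PySem.Int.band (PySem.Int.band a b) mask)) c) 0
  PySem.Int.mod (2 * (N * total - common)) (10 ^ 9 + 7)

-- ===== PRECONDITION & SPEC =====
def Spec_countBitsV4 (N : Int) (A : List Int) (out : Int) : Prop := out = countBitsV4_alt N A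
instance (N : Int) (A : List Int) (out : Int) : Decidable (Spec_countBitsV4 N A out) := by unfold Spec_countBitsV4; infer_instance

-- ===== CLAIM (what is proved, stated in full; the proofs are below) =====
def Claim_equal_countBitsV4 : Prop := ∀ (N : Int) (A : List Int), Dom_countBitsV4 N A → Spec_countBitsV4 N A (countBitsV4 N A)

-- ===== LEMMAS AND PROOFS =====

-- the bit value A tests, as an integer 0/1
def bitv (num : Int) (i : Nat) : Int := if PySem.Int.band num ((1:Int) <<< i) ≠ 0 then 1 else 0

-- the i-th bit of the infinite two's-complement representation of a
def tb (a : Int) (i : Nat) : Bool := if 0 ≤ a then a.toNat.testBit i else !((-a - 1).toNat.testBit i)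

-- ---- generic sum lemmas ----

theorem foldl_add_int {α : Type} (f : α → Int) :
    ∀ (l : List α) (a : Int), l.foldl (fun acc x => acc + f x) a = a + (l.map f).sum := by
  intro l
  induction l with
  | nil => intro a; simp
  | cons x t ih => intro a; simp only [List.foldl_cons, List.map_cons, List.sum_cons]; rw [ih]; ring

theorem sum_map_add {α : Type} (f g : α → Int) :
    ∀ (l : List α), (l.map (fun x => f x + g x)).sum = (l.map f).sum + (l.map g).sum := by
  intro l
  induction l with
  | nil => simp
  | cons x t ih => simp only [List.map_cons, List.sum_cons, ih]; ring

theorem sum_swap_list {α β : Type} (g : α → β → Int) :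
    ∀ (A : List α) (l : List β),
      (A.map (fun a => (l.map (g a)).sum)).sum = (l.map (fun i => (A.map (fun a => g a i)).sum)).sum := by
  intro A
  induction A with
  | nil => intro l; simp
  | cons x t ih =>
    intro l
    simp only [List.map_cons, List.sum_cons, ih]
    rw [← sum_map_add]

theorem sum_mul_list {α : Type} (f : α → Int) (c : Int) :
    ∀ (l : List α), (l.map f).sum * c = (l.map (fun x => f x * c)).sum := by
  intro l
  induction l with
  | nil => simp
  | cons x t ih => simp only [List.map_cons, List.sum_cons, ← ih]; ring

theorem foldl_congr_mem_int {α : Type} {f g : Int → α → Int} :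
    ∀ {l : List α} {c : Int}, (∀ (c : Int) (a : α), a ∈ l → f c a = g c a) → l.foldl f c = l.foldl g c := by
  intro l
  induction l with
  | nil => intro c _; rfl
  | cons x t ih =>
    intro c h
    simp only [List.foldl_cons]
    rw [h c x (by simp)]
    exact ih (fun c a ha => h c a (by simp [ha]))

theorem sum_mul_left_list {α : Type} (f : α → Int) (c : Int) :
    ∀ (l : List α), c * (l.map f).sum = (l.map (fun x => c * f x)).sum := by
  intro l
  induction l with
  | nil => simp
  | cons x t ih => simp only [List.map_cons, List.sum_cons, ← ih]; ring

-- ---- bit-level lemmas ----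

theorem mod_two_eq_toNat (x : Nat) : x % 2 = (x.testBit 0).toNat := by
  cases hb : x.testBit 0 <;> simp [Nat.testBit_zero] at hb <;> simp <;> omega

theorem ldiff_zero_left (n : Nat) : Nat.ldiff 0 n = 0 := by
  apply Nat.eq_of_testBit_eq; intro i; simp [Nat.testBit_ldiff]

theorem ldiff_aux : ∀ (m n : Nat), (m &&& n) + m.ldiff n = m := by
  intro m n
  induction m using Nat.strong_induction_on generalizing n with
  | _ m ih =>
    rcases Nat.eq_zero_or_pos m with hm | hm
    · subst hm; simp [ldiff_zero_left]
    · have hlt : m / 2 < m := Nat.div_lt_self hm one_lt_two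
      have IH := ih (m / 2) hlt (n / 2)
      have ha : (m &&& n) / 2 = m / 2 &&& n / 2 := Nat.and_div_two
      have hl : (m.ldiff n) / 2 = (m / 2).ldiff (n / 2) := by
        apply Nat.eq_of_testBit_eq; intro i
        rw [Nat.testBit_div_two, Nat.testBit_ldiff, Nat.testBit_ldiff,
          Nat.testBit_div_two, Nat.testBit_div_two]
      have hpm : (m &&& n) % 2 + (m.ldiff n) % 2 = m % 2 := by
        rw [mod_two_eq_toNat, mod_two_eq_toNat, mod_two_eq_toNat,
          Nat.testBit_and, Nat.testBit_ldiff]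
        cases m.testBit 0 <;> cases n.testBit 0 <;> simp
      have IH2 : (m &&& n) / 2 + (m.ldiff n) / 2 = m / 2 := by
        rw [ha, hl]; exact IH
      omega

theorem sub_and_testBit (m n i : Nat) :
    (m - (m &&& n)).testBit i = (m.testBit i && !(n.testBit i)) := by
  have h := ldiff_aux m n
  have h2 : m - (m &&& n) = m.ldiff n := by omega
  rw [h2, Nat.testBit_ldiff]

theorem shift_pow (i : Nat) : ((1:Int) <<< i) = ((2 ^ i : Nat) : Int) := by
  induction i with
  | zero => rfl
  | succ k ih => rw [Int.shiftLeft_succ, ih]; push_cast [pow_succ]; ring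

theorem mask_lit : (((1:Int) <<< 32) - 1) = ((2 ^ 32 - 1 : Nat) : Int) := by decide

theorem band_def (a b : Int) : PySem.Int.band a b =
    if 0 ≤ a then (if 0 ≤ b then ((a.toNat &&& b.toNat : Nat) : Int) else ((a.toNat - (a.toNat &&& (-b - 1).toNat) : Nat) : Int))
    else (if 0 ≤ b then ((b.toNat - (b.toNat &&& (-a - 1).toNat) : Nat) : Int) else -((((-a - 1).toNat ||| (-b - 1).toNat : Nat)) : Int) - 1) := by
  simp [PySem.Int.band]

theorem maskNat_testBit (a : Int) (i : Nat) (hi : i < 32) :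
    (PySem.Int.band a (((1:Int) <<< 32) - 1)).toNat.testBit i = tb a i := by
  rw [mask_lit, band_def]
  have hM : (0:Int) ≤ ((2 ^ 32 - 1 : Nat) : Int) := by positivity
  have hMt : ((2 ^ 32 - 1 : Nat) : Int).toNat = 2 ^ 32 - 1 := by simp
  by_cases ha : 0 ≤ a
  · simp only [ha, if_true, hM, if_true, hMt, Int.toNat_natCast, tb]
    rw [Nat.testBit_and, Nat.testBit_two_pow_sub_one]
    simp [hi]
  · simp only [ha, if_false, hM, if_true, hMt, Int.toNat_natCast, tb]
    rw [sub_and_testBit, Nat.testBit_two_pow_sub_one]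
    simp [hi]

theorem maskNat_lt (a : Int) : (PySem.Int.band a (((1:Int) <<< 32) - 1)).toNat < 2 ^ 32 := by
  rw [mask_lit, band_def]
  have hM : (0:Int) ≤ ((2 ^ 32 - 1 : Nat) : Int) := by positivity
  by_cases ha : 0 ≤ a
  · simp only [ha, if_true, hM, if_true, Int.toNat_natCast]
    have := Nat.and_le_right (n := a.toNat) (m := ((2 ^ 32 - 1 : Nat) : Int).toNat)
    simp at this ⊢
    omega
  · simp only [ha, if_false, hM, if_true, Int.toNat_natCast]
    simp
    omega

theorem bitv_cond (a : Int) (i : Nat) :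
    (PySem.Int.band a ((1:Int) <<< i) ≠ 0) ↔ tb a i = true := by
  rw [shift_pow, band_def]
  have hp : (0:Int) ≤ ((2 ^ i : Nat) : Int) := by positivity
  have hpt : ((2 ^ i : Nat) : Int).toNat = 2 ^ i := Int.toNat_natCast _
  by_cases ha : 0 ≤ a
  · simp only [ha, if_true, hp, if_true, hpt, Int.toNat_natCast, tb]
    rw [Nat.and_two_pow]
    have hp2 : (0:Nat) < 2 ^ i := Nat.two_pow_pos i
    cases h : a.toNat.testBit i <;> simp [h] <;> omega
  · simp only [ha, if_false, hp, if_true, hpt, Int.toNat_natCast, tb]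
    rw [Nat.and_comm, Nat.and_two_pow]
    have hp2 : (0:Nat) < 2 ^ i := Nat.two_pow_pos i
    cases h : (-a - 1).toNat.testBit i <;> simp [h] <;> omega

theorem bitv_eq_tb (a : Int) (i : Nat) : bitv a i = if tb a i then 1 else 0 := by
  unfold bitv
  by_cases h : PySem.Int.band a ((1:Int) <<< i) ≠ 0
  · rw [if_pos h, if_pos ((bitv_cond a i).mp h)]
  · rw [if_neg h]
    have : ¬ tb a i = true := fun ht => h ((bitv_cond a i).mpr ht)
    rw [if_neg this]

theorem tb_band (a b : Int) (i : Nat) : tb (PySem.Int.band a b) i = (tb a i && tb b i) := by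
  rw [band_def]
  by_cases ha : 0 ≤ a <;> by_cases hb : 0 ≤ b
  · simp only [ha, hb, if_true, tb]
    have h0 : (0:Int) ≤ ((a.toNat &&& b.toNat : Nat) : Int) := by positivity
    simp [h0, Nat.testBit_and, ha, hb]
  · simp only [ha, hb, if_true, if_false, tb]
    have h0 : (0:Int) ≤ ((a.toNat - (a.toNat &&& (-b - 1).toNat) : Nat) : Int) := by positivity
    simp only [h0, if_true, ha, if_true, hb, if_false, Int.toNat_natCast]
    rw [sub_and_testBit]
  · simp only [ha, hb, if_true, if_false, tb]
    have h0 : (0:Int) ≤ ((b.toNat - (b.toNat &&& (-a - 1).toNat) : Nat) : Int) := by positivity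
    simp only [h0, if_true, ha, if_false, hb, if_true, Int.toNat_natCast]
    rw [sub_and_testBit]
    exact Bool.and_comm _ _
  · simp only [ha, hb, if_false, tb]
    have hz : (0:Int) ≤ (((-a - 1).toNat ||| (-b - 1).toNat : Nat) : Int) := by positivity
    have h0 : ¬ (0:Int) ≤ -(((-a - 1).toNat ||| (-b - 1).toNat : Nat) : Int) - 1 := by omega
    simp only [h0, if_false, ha, if_false, hb]
    have he : (-(-(((-a - 1).toNat ||| (-b - 1).toNat : Nat) : Int) - 1) - 1).toNat
        = (-a - 1).toNat ||| (-b - 1).toNat := by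
      have h3 : (-(-(((-a - 1).toNat ||| (-b - 1).toNat : Nat) : Int) - 1) - 1) = (((-a - 1).toNat ||| (-b - 1).toNat : Nat) : Int) := by ring
      rw [h3, Int.toNat_natCast]
    rw [he, Nat.testBit_or]
    cases (-a - 1).toNat.testBit i <;> cases (-b - 1).toNat.testBit i <;> simp

-- ---- popcount ----

theorem popcountAux_shift : ∀ (n : Nat) (c : Int), popcountAux c n = c + popcountAux 0 n := by
  intro n
  induction n using Nat.strong_induction_on with
  | _ n ih =>
    intro c
    rcases Nat.eq_zero_or_pos n with h | h
    · subst h; simp [popcountAux]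
    · have hne : n ≠ 0 := Nat.pos_iff_ne_zero.mp h
      have hlt : n / 2 < n := Nat.div_lt_self h one_lt_two
      have ueq : ∀ c : Int, popcountAux c n = popcountAux (c + ((n % 2 : Nat) : Int)) (n / 2) := by
        intro c; rw [popcountAux]; exact dif_neg hne
      rw [ueq c, ueq 0, ih (n / 2) hlt, ih (n / 2) hlt (0 + ((n % 2 : Nat) : Int))]
      ring

theorem popcountAux_bits : ∀ (k n : Nat), n < 2 ^ k →
    popcountAux 0 n = ((List.range k).map (fun i => if n.testBit i then (1:Int) else 0)).sum := by
  intro k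
  induction k with
  | zero =>
    intro n hn
    have h0 : n = 0 := by simpa using hn
    subst h0; simp [popcountAux]
  | succ k ih =>
    intro n hn
    rcases Nat.eq_zero_or_pos n with h | h
    · subst h
      simp [popcountAux, Nat.zero_testBit]
    · have hne : n ≠ 0 := Nat.pos_iff_ne_zero.mp h
      have hdiv : n / 2 < 2 ^ k := by
        rw [pow_succ] at hn; omega
      have ueq : popcountAux 0 n = popcountAux (0 + ((n % 2 : Nat) : Int)) (n / 2) := by
        rw [popcountAux]; exact dif_neg hne
      rw [ueq, popcountAux_shift, ih (n / 2) hdiv, List.range_succ_eq_map]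
      simp only [List.map_cons, List.sum_cons, List.map_map]
      have hb0 : (if n.testBit 0 then (1:Int) else 0) = ((n % 2 : Nat) : Int) := by
        rcases Nat.mod_two_eq_zero_or_one n with h2 | h2 <;> simp [Nat.testBit_zero, h2]
      have hmap : (List.map ((fun i => if n.testBit i then (1:Int) else 0) ∘ Nat.succ) (List.range k))
          = (List.map (fun i => if (n / 2).testBit i then (1:Int) else 0) (List.range k)) := by
        apply List.map_congr_left
        intro i _
        simp [Function.comp, Nat.testBit_succ]
      rw [hmap, ← hb0]
      ring

theorem popcount_band_mask (x : Int) :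
    popcount (PySem.Int.band x (((1:Int) <<< 32) - 1))
      = ((List.range 32).map (fun i => bitv x i)).sum := by
  unfold popcount
  rw [popcountAux_bits 32 _ (maskNat_lt x)]
  apply congrArg
  apply List.map_congr_left
  intro i hi
  rw [maskNat_testBit x i (List.mem_range.mp hi), bitv_eq_tb]

theorem bitv_band (a b : Int) (i : Nat) : bitv (PySem.Int.band a b) i = bitv a i * bitv b i := by
  rw [bitv_eq_tb, bitv_eq_tb, bitv_eq_tb, tb_band]
  cases tb a i <;> cases tb b i <;> simp

-- ---- A-side characterization ----

theorem foldl_append_bits (num : Int) :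
    ∀ (l : List Nat) (acc : List Int),
      l.foldl (fun bits (i : Nat) => if PySem.Int.band num ((1:Int) <<< i) ≠ 0 then bits ++ [1] else bits ++ [0]) acc
      = acc ++ l.map (bitv num) := by
  intro l
  induction l with
  | nil => intro acc; simp
  | cons i t ih =>
    intro acc
    simp only [List.foldl_cons, List.map_cons]
    rw [ih]
    simp only [bitv]
    split_ifs <;> simp

theorem intToBitArray_getD (num : Int) (i : Nat) (hi : i < 32) :
    (intToBitArray num).getD i 0 = bitv num i := by
  have h : intToBitArray num = (List.range 32).map (bitv num) := by
    unfold intToBitArray; rw [foldl_append_bits]; simp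
  rw [h, List.getD_eq_getElem _ _ (by simpa using hi)]
  simp

theorem A_char (N : Int) (A : List Int) :
    countBitsV4 N A
      = PySem.Int.mod
          (((List.range 32).map (fun i =>
              (A.map (fun a => bitv a i)).sum * (N - (A.map (fun a => bitv a i)).sum) * 2)).sum)
          (10 ^ 9 + 7) := by
  unfold countBitsV4
  dsimp only
  rw [foldl_add_int (fun i => ((A.map intToBitArray).map (fun bit => bit.getD i 0)).sum *
      (N - ((A.map intToBitArray).map (fun bit => bit.getD i 0)).sum) * 2) (List.range 32) 0,
    zero_add]
  apply congrArg (fun r => PySem.Int.mod r ((10:Int) ^ 9 + 7))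
  apply congrArg
  apply List.map_congr_left
  intro i hi
  have hc : ((A.map intToBitArray).map (fun bit => bit.getD i 0)).sum
      = (A.map (fun a => bitv a i)).sum := by
    rw [List.map_map]
    apply congrArg
    apply List.map_congr_left
    intro a _
    exact intToBitArray_getD a i (List.mem_range.mp hi)
  rw [hc]

-- ---- B-side characterization ----

theorem B_char (N : Int) (A : List Int) :
    countBitsV4_alt N A
      = PySem.Int.mod
          (2 * (N * (A.map (fun a => ((List.range 32).map (fun i => bitv a i)).sum)).sum
             - (A.map (fun a => (A.map (fun b =>
                 ((List.range 32).map (fun i => bitv a i * bitv b i)).sum)).sum)).sum))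
          (10 ^ 9 + 7) := by
  unfold countBitsV4_alt
  dsimp only
  rw [foldl_add_int (fun a => popcount (PySem.Int.band a (((1:Int) <<< 32) - 1))) A 0, zero_add]
  have hcommon : A.foldl (fun c a =>
      A.foldl (fun c b => c + popcount (PySem.Int.band (PySem.Int.band a b) (((1:Int) <<< 32) - 1))) c) 0
      = (A.map (fun a => (A.map (fun b =>
          popcount (PySem.Int.band (PySem.Int.band a b) (((1:Int) <<< 32) - 1)))).sum)).sum := by
    have h1 : ∀ (a : Int) (c : Int),
        A.foldl (fun c b => c + popcount (PySem.Int.band (PySem.Int.band a b) (((1:Int) <<< 32) - 1))) c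
        = c + (A.map (fun b => popcount (PySem.Int.band (PySem.Int.band a b) (((1:Int) <<< 32) - 1)))).sum :=
      fun a c => foldl_add_int _ A c
    calc A.foldl (fun c a =>
        A.foldl (fun c b => c + popcount (PySem.Int.band (PySem.Int.band a b) (((1:Int) <<< 32) - 1))) c) 0
        = A.foldl (fun c a => c + (A.map (fun b =>
            popcount (PySem.Int.band (PySem.Int.band a b) (((1:Int) <<< 32) - 1)))).sum) 0 := by
          apply foldl_congr_mem_int
          intro c a _
          exact h1 a c
      _ = _ := by rw [foldl_add_int _ A 0, zero_add]
  rw [hcommon]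
  have htot : (A.map (fun a => popcount (PySem.Int.band a (((1:Int) <<< 32) - 1)))).sum
      = (A.map (fun a => ((List.range 32).map (fun i => bitv a i)).sum)).sum := by
    apply congrArg
    apply List.map_congr_left
    intro a _
    exact popcount_band_mask a
  have hcom2 : (A.map (fun a => (A.map (fun b =>
        popcount (PySem.Int.band (PySem.Int.band a b) (((1:Int) <<< 32) - 1)))).sum)).sum
      = (A.map (fun a => (A.map (fun b =>
          ((List.range 32).map (fun i => bitv a i * bitv b i)).sum)).sum)).sum := by
    apply congrArg
    apply List.map_congr_left
    intro a _
    apply congrArg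
    apply List.map_congr_left
    intro b _
    rw [popcount_band_mask]
    apply congrArg
    apply List.map_congr_left
    intro i _
    exact bitv_band a b i
  rw [htot, hcom2]

-- ---- the algebraic identity ----

theorem final_alg (f : Nat → Int) :
    ∀ (l : List Nat) (N : Int),
      (l.map (fun i => f i * (N - f i) * 2)).sum
        = 2 * (N * (l.map f).sum - (l.map (fun i => f i * f i)).sum) := by
  intro l
  induction l with
  | nil => intro N; simp
  | cons x t ih =>
    intro N
    simp only [List.map_cons, List.sum_cons, ih]
    ring

theorem key_identity (N : Int) (A : List Int) :
    ((List.range 32).map (fun i =>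
        (A.map (fun a => bitv a i)).sum * (N - (A.map (fun a => bitv a i)).sum) * 2)).sum
    = 2 * (N * (A.map (fun a => ((List.range 32).map (fun i => bitv a i)).sum)).sum
         - (A.map (fun a => (A.map (fun b =>
             ((List.range 32).map (fun i => bitv a i * bitv b i)).sum)).sum)).sum) := by
  have hT : (A.map (fun a => ((List.range 32).map (fun i => bitv a i)).sum)).sum
      = ((List.range 32).map (fun i => (A.map (fun a => bitv a i)).sum)).sum :=
    sum_swap_list (fun a i => bitv a i) A (List.range 32)
  have hC : (A.map (fun a => (A.map (fun b =>
        ((List.range 32).map (fun i => bitv a i * bitv b i)).sum)).sum)).sum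
      = ((List.range 32).map (fun i =>
          (A.map (fun a => bitv a i)).sum * (A.map (fun a => bitv a i)).sum)).sum := by
    have step1 : ∀ a : Int, (A.map (fun b =>
        ((List.range 32).map (fun i => bitv a i * bitv b i)).sum)).sum
        = ((List.range 32).map (fun i => (A.map (fun b => bitv a i * bitv b i)).sum)).sum :=
      fun a => sum_swap_list (fun b i => bitv a i * bitv b i) A (List.range 32)
    calc (A.map (fun a => (A.map (fun b =>
          ((List.range 32).map (fun i => bitv a i * bitv b i)).sum)).sum)).sum
        = (A.map (fun a => ((List.range 32).map (fun i =>
            (A.map (fun b => bitv a i * bitv b i)).sum)).sum)).sum := by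
          apply congrArg; apply List.map_congr_left; intro a _; exact step1 a
      _ = ((List.range 32).map (fun i => (A.map (fun a =>
            (A.map (fun b => bitv a i * bitv b i)).sum)).sum)).sum :=
          sum_swap_list (fun a i => (A.map (fun b => bitv a i * bitv b i)).sum) A (List.range 32)
      _ = ((List.range 32).map (fun i =>
            (A.map (fun a => bitv a i)).sum * (A.map (fun a => bitv a i)).sum)).sum := by
          apply congrArg; apply List.map_congr_left; intro i _
          rw [sum_mul_list (fun a => bitv a i) ((A.map (fun a => bitv a i)).sum) A]
          apply congrArg; apply List.map_congr_left; intro a _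
          exact (sum_mul_left_list (fun b => bitv b i) (bitv a i) A).symm
  rw [hT, hC]
  exact final_alg (fun i => (A.map (fun a => bitv a i)).sum) (List.range 32) N

-- ===== VERDICT (by name: the statement is the Claim_ definition above) =====
theorem countBitsV4_spec : Claim_equal_countBitsV4 := by
  intro N A _
  show countBitsV4 N A = countBitsV4_alt N A
  rw [A_char, B_char, key_identity]
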